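-- pv_equiv track=rewrite | github.com/Rigras12/proyecto-Dalgo-Pablo | proyecto1.py | torres
-- ===== SOURCE A (Python) =====
-- def torres(i:int,j:int ,portales:dict ,energia:dict,maximo:int)->int:
--     minimo=maximo
--     eficiencia=0
--     if i==1:
--         eficiencia_base=abs(j-1)*energia[i]
--         return eficiencia_base
--     elif i not in portales:
--         return maximo
--     else:
--         for j_portal in portales[i]:
--             for portales_cuarto in portales[i][j_portal]:
--                 coordenadas=portales_cuarto
--                 eficiencia=abs(j-j_portal)*energia[i]
--                 valor=torres(coordenadas[0],coordenadas[1],portales,energia,maximo)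
--                 if valor==maximo:
--                     eficiencia=maximo
--                 else:
--                     eficiencia+=valor
--
--                 if eficiencia<minimo:
--                     minimo=eficiencia
--
--         return minimo
-- ===== SOURCE B (Python) =====
-- def torres(i: int, j: int, portales: dict, energia: dict, maximo: int) -> int:
--     # Memoized on (room, column): each state is computed once, its candidate
--     # costs are collected into a list and min() taken, instead of A's plain
--     # exponential recursion with a running minimum.
--     memo = {}
--
--     def cost(i, j):
--         if (i, j) not in memo:
--             if i == 1:
--                 memo[(i, j)] = abs(j - 1) * energia[i]
--             elif i not in portales:
--                 memo[(i, j)] = maximo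
--             else:
--                 cands = [maximo]
--                 for jp, dests in portales[i].items():
--                     for ci, cj in dests:
--                         v = cost(ci, cj)
--                         cands.append(maximo if v == maximo else abs(j - jp) * energia[i] + v)
--                 memo[(i, j)] = min(cands)
--         return memo[(i, j)]
--
--     return cost(i, j)
-- ===== Notes on version B (the rewrite author's own statement) =====
-- stated objective: alternative
-- what changed: B replaces A's plain exponential recursion by memoization on (room, column) — a cache filled once per state — and computes each room's answer as min() of an explicitly built candidate list instead of A's running-minimum loops.
import Mathlib
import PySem

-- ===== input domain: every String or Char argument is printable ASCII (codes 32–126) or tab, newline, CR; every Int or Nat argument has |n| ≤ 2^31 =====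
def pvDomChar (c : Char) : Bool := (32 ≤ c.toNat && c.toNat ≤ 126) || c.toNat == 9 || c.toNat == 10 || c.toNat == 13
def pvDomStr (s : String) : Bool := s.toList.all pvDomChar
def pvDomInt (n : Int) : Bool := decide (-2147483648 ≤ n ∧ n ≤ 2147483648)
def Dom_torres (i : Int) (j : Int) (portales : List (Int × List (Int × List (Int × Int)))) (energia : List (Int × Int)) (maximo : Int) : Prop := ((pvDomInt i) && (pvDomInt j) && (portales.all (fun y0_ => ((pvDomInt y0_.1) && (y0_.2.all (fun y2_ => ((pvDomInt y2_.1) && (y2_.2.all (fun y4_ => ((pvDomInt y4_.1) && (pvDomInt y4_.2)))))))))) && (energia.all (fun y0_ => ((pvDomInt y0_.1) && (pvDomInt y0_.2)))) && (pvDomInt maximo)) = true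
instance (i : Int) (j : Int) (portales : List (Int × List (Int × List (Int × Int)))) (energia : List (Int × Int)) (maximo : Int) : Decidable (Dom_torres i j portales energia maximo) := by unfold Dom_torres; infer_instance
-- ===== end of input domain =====

-- B memoizes A's recursion on (room, column) and takes min() of an explicitly built candidate list; alternative algorithm, same result.


-- ===== PORT A =====
-- A's recursion, fuel-indexed to make it total in Lean; under Pre_torres the
-- reachable portal graph is acyclic, so recursion chains never repeat a keyed
-- room and fuel portales.length + 1 is never exhausted (proved below): the
-- fuel guard only totalises, it never changes the value on admitted inputs.
def torresGoA (fuel : Nat) (portales : List (Int × List (Int × List (Int × Int)))) (energia : List (Int × Int)) (maximo : Int) (i j : Int) : Int :=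
  match fuel with
  | 0 => 0
  | f + 1 =>
    if i = 1 then
      |j - 1| * ((energia.lookup i).getD 0)          -- energia[i]; present under Pre_torres
    else
      match portales.lookup i with
      | none => maximo                                -- i not in portales
      | some inner =>
        inner.foldl (fun minimo jpd =>
          jpd.2.foldl (fun minimo cd =>
            let eficiencia := |j - jpd.1| * ((energia.lookup i).getD 0)
            let valor := torresGoA f portales energia maximo cd.1 cd.2
            let eficiencia := if valor = maximo then maximo else eficiencia + valor
            if eficiencia < minimo then eficiencia else minimo) minimo) maximo

def torres (i : Int) (j : Int) (portales : List (Int × List (Int × List (Int × Int)))) (energia : List (Int × Int)) (maximo : Int) : Int :=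
  torresGoA (portales.length + 1) portales energia maximo i j

-- ===== PORT B =====
-- Source B's cost(): it fills the memo dict (returned by torresGoB) and reads the
-- answer back from memo[(i, j)]; candidates are collected into a list
-- (starting [maximo]) and min() of that list is stored.  Same fuel bound as A
-- (the fuel only totalises the recursion).
def torresGoB (fuel : Nat) (portales : List (Int × List (Int × List (Int × Int)))) (energia : List (Int × Int)) (maximo : Int) (i j : Int) (memo : PySem.Dict (Int × Int) Int) : PySem.Dict (Int × Int) Int :=
  match fuel with
  | 0 => memo
  | f + 1 =>
    if memo.contains (i, j) then memo
    else if i = 1 then memo.insert (i, j) (|j - 1| * ((energia.lookup i).getD 0))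
    else
      match portales.lookup i with
      | none => memo.insert (i, j) maximo
      | some inner =>
        let st := inner.foldl (fun (st : List Int × PySem.Dict (Int × Int) Int) jpd =>
          jpd.2.foldl (fun (st : List Int × PySem.Dict (Int × Int) Int) cd =>
            let m' := torresGoB f portales energia maximo cd.1 cd.2 st.2
            let v := (m'.get? (cd.1, cd.2)).getD 0
            (st.1 ++ [if v = maximo then maximo else |j - jpd.1| * ((energia.lookup i).getD 0) + v], m')) st) ([maximo], memo)
        st.2.insert (i, j) ((PySem.List.min? st.1 (fun x => x)).getD 0)

def torres_alt (i : Int) (j : Int) (portales : List (Int × List (Int × List (Int × Int)))) (energia : List (Int × Int)) (maximo : Int) : Int :=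
  ((torresGoB (portales.length + 1) portales energia maximo i j PySem.Dict.empty).get? (i, j)).getD 0

-- ===== PRECONDITION & SPEC =====
-- Helpers Pre_torres is phrased with: the rooms the recursion visits, as the
-- closure of {i} under the portal-destination edges (pvChld) — iterated enough
-- times (pvNIter) to saturate, which is proved below.
def pvChld (portales : List (Int × List (Int × List (Int × Int)))) (r : Int) : List Int :=
  if r = 1 then [] else ((portales.lookup r).getD []).flatMap (fun jd => jd.2.map Prod.fst)

def pvStepR (portales : List (Int × List (Int × List (Int × Int)))) (S : Finset Int) : Finset Int :=
  S ∪ S.biUnion (fun r => (pvChld portales r).toFinset)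

def pvAllDest (portales : List (Int × List (Int × List (Int × Int)))) : Finset Int :=
  (portales.flatMap (fun kv => kv.2.flatMap (fun jd => jd.2.map Prod.fst))).toFinset

def pvNIter (portales : List (Int × List (Int × List (Int × Int)))) : Nat :=
  (pvAllDest portales).card + 2

def pvReach (portales : List (Int × List (Int × List (Int × Int)))) (r : Int) : Finset Int :=
  (pvStepR portales)^[pvNIter portales] {r}

-- Pre_torres holds exactly where Python A returns: it excludes (a) inputs on
-- which A raises — a cycle in the portal graph reachable from room i
-- (RecursionError) or a missing energia key at a visited room that needs it
-- (KeyError) — and (b) duplicate keys in the association-list encodings of the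
-- two dict arguments, which a Python dict cannot represent.
def Pre_torres (i : Int) (j : Int) (portales : List (Int × List (Int × List (Int × Int)))) (energia : List (Int × Int)) (maximo : Int) : Prop :=
  (portales.map Prod.fst).Nodup ∧ (energia.map Prod.fst).Nodup ∧
  (∀ k ∈ pvReach portales i, ∀ c ∈ pvChld portales k, k ∉ pvReach portales c) ∧
  (∀ k ∈ pvReach portales i,
     (k = 1 → (1 : Int) ∈ energia.map Prod.fst) ∧
     (¬ k = 1 → pvChld portales k ≠ [] → k ∈ energia.map Prod.fst))

instance (i : Int) (j : Int) (portales : List (Int × List (Int × List (Int × Int)))) (energia : List (Int × Int)) (maximo : Int) : Decidable (Pre_torres i j portales energia maximo) := by unfold Pre_torres; infer_instance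

def pvWitness_torres : Int × Int × (List (Int × List (Int × List (Int × Int)))) × (List (Int × Int)) × Int :=
  (3, 2, [(3, [(1, [(1, 0)])])], [(3, 2), (1, 5)], 100)

def Spec_torres (i : Int) (j : Int) (portales : List (Int × List (Int × List (Int × Int)))) (energia : List (Int × Int)) (maximo : Int) (out : Int) : Prop := out = torres_alt i j portales energia maximo
instance (i : Int) (j : Int) (portales : List (Int × List (Int × List (Int × Int)))) (energia : List (Int × Int)) (maximo : Int) (out : Int) : Decidable (Spec_torres i j portales energia maximo out) := by unfold Spec_torres; infer_instance

-- ===== CLAIM (what is proved, stated in full; the proofs are below) =====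
def Claim_equal_torres : Prop := ∀ (i : Int) (j : Int) (portales : List (Int × List (Int × List (Int × Int)))) (energia : List (Int × Int)) (maximo : Int), Dom_torres i j portales energia maximo → Pre_torres i j portales energia maximo → Spec_torres i j portales energia maximo (torres i j portales energia maximo)

-- ===== LEMMAS AND PROOFS =====

-- first-match lookup success means membership
theorem pv_lookup_mem {β : Type} (p : List (Int × β)) (i : Int) (b : β)
    (h : p.lookup i = some b) : (i, b) ∈ p := by
  induction p with
  | nil => simp [List.lookup] at h
  | cons hd t ih =>
    obtain ⟨k, v⟩ := hd
    simp only [List.lookup] at h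
    split at h
    · rename_i heq
      have hk : i = k := by simpa using heq
      cases h
      subst hk
      exact List.mem_cons_self
    · exact List.mem_cons_of_mem _ (ih h)

-- membership in pvChld, forwards and backwards
theorem pv_mem_chld {portales : List (Int × List (Int × List (Int × Int)))} {i : Int}
    {inner : List (Int × List (Int × Int))} (h1 : ¬ i = 1) (hlook : portales.lookup i = some inner)
    {jd : Int × List (Int × Int)} (hjd : jd ∈ inner) {cd : Int × Int} (hcd : cd ∈ jd.2) :
    cd.1 ∈ pvChld portales i := by
  unfold pvChld
  rw [if_neg h1, hlook]
  simp only [Option.getD_some, List.mem_flatMap, List.mem_map]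
  exact ⟨jd, hjd, cd, hcd, rfl⟩

theorem pv_chld_elim {portales : List (Int × List (Int × List (Int × Int)))} {r c : Int}
    (h : c ∈ pvChld portales r) :
    ¬ r = 1 ∧ ∃ inner, portales.lookup r = some inner ∧
      ∃ jd ∈ inner, ∃ cd ∈ jd.2, c = cd.1 := by
  unfold pvChld at h
  by_cases h1 : r = 1
  · rw [if_pos h1] at h; simp at h
  · rw [if_neg h1] at h
    cases hl : portales.lookup r with
    | none => rw [hl] at h; simp at h
    | some inner =>
      rw [hl] at h
      simp only [Option.getD_some, List.mem_flatMap, List.mem_map] at h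
      obtain ⟨jd, hjd, cd, hcd, hc⟩ := h
      exact ⟨h1, inner, rfl, jd, hjd, cd, hcd, hc.symm⟩

-- step / reach basics
theorem pv_subset_stepR (portales : List (Int × List (Int × List (Int × Int)))) (S : Finset Int) :
    S ⊆ pvStepR portales S := Finset.subset_union_left

theorem pv_stepR_mono (portales : List (Int × List (Int × List (Int × Int)))) {S T : Finset Int}
    (h : S ⊆ T) : pvStepR portales S ⊆ pvStepR portales T :=
  Finset.union_subset_union h (Finset.biUnion_subset_biUnion_of_subset_left _ h)

theorem pv_mem_stepR_of_chld (portales : List (Int × List (Int × List (Int × Int)))) {S : Finset Int}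
    {r c : Int} (hr : r ∈ S) (hc : c ∈ pvChld portales r) : c ∈ pvStepR portales S := by
  unfold pvStepR
  exact Finset.mem_union_right _ (Finset.mem_biUnion.2 ⟨r, hr, List.mem_toFinset.2 hc⟩)

theorem pv_subset_iter (portales : List (Int × List (Int × List (Int × Int)))) (n : Nat) (S : Finset Int) :
    S ⊆ (pvStepR portales)^[n] S := by
  induction n with
  | zero => simp
  | succ n ih =>
    rw [Function.iterate_succ_apply']
    exact ih.trans (pv_subset_stepR portales _)

theorem pv_iter_subset_closed (portales : List (Int × List (Int × List (Int × Int)))) {S T : Finset Int}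
    (hST : S ⊆ T) (hT : pvStepR portales T = T) (n : Nat) : (pvStepR portales)^[n] S ⊆ T := by
  induction n with
  | zero => simpa
  | succ n ih =>
    rw [Function.iterate_succ_apply']
    calc pvStepR portales ((pvStepR portales)^[n] S) ⊆ pvStepR portales T := pv_stepR_mono portales ih
      _ = T := hT

theorem pv_chld_subset_allDest (portales : List (Int × List (Int × List (Int × Int)))) {r c : Int}
    (h : c ∈ pvChld portales r) : c ∈ pvAllDest portales := by
  obtain ⟨h1, inner, hlook, jd, hjd, cd, hcd, hc⟩ := pv_chld_elim h
  unfold pvAllDest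
  refine List.mem_toFinset.2 (List.mem_flatMap.2 ⟨(r, inner), pv_lookup_mem _ _ _ hlook, ?_⟩)
  exact List.mem_flatMap.2 ⟨jd, hjd, List.mem_map.2 ⟨cd, hcd, hc.symm⟩⟩

theorem pv_iter_bounded (portales : List (Int × List (Int × List (Int × Int)))) (n : Nat) (S : Finset Int) :
    (pvStepR portales)^[n] S ⊆ S ∪ pvAllDest portales := by
  induction n with
  | zero => simp
  | succ n ih =>
    rw [Function.iterate_succ_apply']
    refine Finset.union_subset (ih.trans ?_) ?_
    · exact fun x hx => hx
    · refine Finset.biUnion_subset.2 fun r _ => ?_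
      intro x hx
      exact Finset.mem_union_right _ (pv_chld_subset_allDest portales (List.mem_toFinset.1 hx))

theorem pv_grow (portales : List (Int × List (Int × List (Int × Int)))) (S : Finset Int) (n : Nat) :
    (∃ k < n, (pvStepR portales)^[k + 1] S = (pvStepR portales)^[k] S) ∨
      S.card + n ≤ ((pvStepR portales)^[n] S).card := by
  induction n with
  | zero => right; simp
  | succ n ih =>
    rcases ih with ⟨k, hk, he⟩ | h
    · exact Or.inl ⟨k, Nat.lt_succ_of_lt hk, he⟩
    · by_cases he : (pvStepR portales)^[n + 1] S = (pvStepR portales)^[n] S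
      · exact Or.inl ⟨n, Nat.lt_succ_self n, he⟩
      · right
        have hsub : (pvStepR portales)^[n] S ⊆ (pvStepR portales)^[n + 1] S := by
          rw [Function.iterate_succ_apply']
          exact pv_subset_stepR portales _
        have := Finset.card_lt_card (Finset.ssubset_iff_subset_ne.2 ⟨hsub, fun hh => he hh.symm⟩)
        omega

theorem pv_fix_persist (portales : List (Int × List (Int × List (Int × Int)))) {S : Finset Int} {k : Nat}
    (h : (pvStepR portales)^[k + 1] S = (pvStepR portales)^[k] S) :
    ∀ m : Nat, (pvStepR portales)^[k + m] S = (pvStepR portales)^[k] S := by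
  intro m
  induction m with
  | zero => rfl
  | succ m ih =>
    have e : k + (m + 1) = (k + m) + 1 := by omega
    have h2 := Function.iterate_succ_apply' (pvStepR portales) k S
    rw [e, Function.iterate_succ_apply', ih, ← h2, h]

theorem pv_reach_fix (portales : List (Int × List (Int × List (Int × Int)))) (r : Int) :
    pvStepR portales (pvReach portales r) = pvReach portales r := by
  have hgrow := pv_grow portales {r} (pvNIter portales)
  rcases hgrow with ⟨k, hk, he⟩ | h
  · have h1 : ∀ m : Nat, (pvStepR portales)^[k + m] ({r} : Finset Int) = (pvStepR portales)^[k] {r} :=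
      pv_fix_persist portales he
    have hN : pvReach portales r = (pvStepR portales)^[k] {r} := by
      unfold pvReach
      have : pvNIter portales = k + (pvNIter portales - k) := by omega
      rw [this, h1]
    have h2 := Function.iterate_succ_apply' (pvStepR portales) k ({r} : Finset Int)
    rw [hN, ← h2, he]
  · exfalso
    have hb := pv_iter_bounded portales (pvNIter portales) ({r} : Finset Int)
    have hc := Finset.card_le_card hb
    have hu : (({r} : Finset Int) ∪ pvAllDest portales).card ≤ 1 + (pvAllDest portales).card := by
      calc (({r} : Finset Int) ∪ pvAllDest portales).card
          ≤ ({r} : Finset Int).card + (pvAllDest portales).card := Finset.card_union_le _ _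
        _ = 1 + (pvAllDest portales).card := by simp
    simp only [Finset.card_singleton] at h
    have hN : pvNIter portales = (pvAllDest portales).card + 2 := rfl
    omega

theorem pv_reach_self (portales : List (Int × List (Int × List (Int × Int)))) (r : Int) :
    r ∈ pvReach portales r :=
  pv_subset_iter portales (pvNIter portales) {r} (Finset.mem_singleton_self r)

theorem pv_reach_closed (portales : List (Int × List (Int × List (Int × Int)))) {r k c : Int}
    (hk : k ∈ pvReach portales r) (hc : c ∈ pvChld portales k) : c ∈ pvReach portales r := by
  rw [← pv_reach_fix portales r]
  exact pv_mem_stepR_of_chld portales hk hc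

theorem pv_reach_chld_subset (portales : List (Int × List (Int × List (Int × Int)))) {r c : Int}
    (hc : c ∈ pvChld portales r) : pvReach portales c ⊆ pvReach portales r := by
  have hcr : c ∈ pvReach portales r := pv_reach_closed portales (pv_reach_self portales r) hc
  exact pv_iter_subset_closed portales (Finset.singleton_subset_iff.2 hcr) (pv_reach_fix portales r) _

-- rank: number of distinct keyed (≠ 1) rooms reachable from r; it strictly
-- decreases along portal edges when no reachable cycle exists
def pvRank (portales : List (Int × List (Int × List (Int × Int)))) (r : Int) : Nat :=
  ((pvReach portales r).filter (fun k => ¬ k = 1 ∧ k ∈ portales.map Prod.fst)).card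

theorem pv_rank_lt (portales : List (Int × List (Int × List (Int × Int)))) {r c : Int}
    (hc : c ∈ pvChld portales r) (hac : r ∉ pvReach portales c) :
    pvRank portales c < pvRank portales r := by
  obtain ⟨h1, inner, hlook, _⟩ := pv_chld_elim hc
  have hrk : r ∈ portales.map Prod.fst := List.mem_map_of_mem (pv_lookup_mem _ _ _ hlook)
  apply Finset.card_lt_card
  rw [Finset.ssubset_iff_of_subset (Finset.filter_subset_filter _ (pv_reach_chld_subset portales hc))]
  refine ⟨r, Finset.mem_filter.2 ⟨pv_reach_self portales r, h1, hrk⟩, fun hh => hac (Finset.mem_filter.1 hh).1⟩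

theorem pv_rank_le (portales : List (Int × List (Int × List (Int × Int)))) (r : Int) :
    pvRank portales r ≤ portales.length := by
  have hsub : (pvReach portales r).filter (fun k => ¬ k = 1 ∧ k ∈ portales.map Prod.fst) ⊆
      (portales.map Prod.fst).toFinset := by
    intro x hx
    exact List.mem_toFinset.2 (Finset.mem_filter.1 hx).2.2
  calc pvRank portales r ≤ (portales.map Prod.fst).toFinset.card := Finset.card_le_card hsub
    _ ≤ (portales.map Prod.fst).length := List.toFinset_card_le _
    _ = portales.length := List.length_map ..

-- one-step unfolding of the A-side recursion in the portal branch
theorem torresGoA_step (f : Nat) (portales : List (Int × List (Int × List (Int × Int)))) (energia : List (Int × Int)) (maximo : Int) (i j : Int) (inner : List (Int × List (Int × Int)))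
    (h1 : ¬ i = 1) (hlook : portales.lookup i = some inner) :
    torresGoA (f + 1) portales energia maximo i j =
      List.foldl (fun (minimo : Int) (jpd : Int × List (Int × Int)) => List.foldl (fun (minimo : Int) (cd : Int × Int) => if (if (torresGoA (f) portales energia maximo cd.1 cd.2) = maximo then maximo else |j - jpd.1| * ((energia.lookup i).getD 0) + (torresGoA (f) portales energia maximo cd.1 cd.2)) < minimo then (if (torresGoA (f) portales energia maximo cd.1 cd.2) = maximo then maximo else |j - jpd.1| * ((energia.lookup i).getD 0) + (torresGoA (f) portales energia maximo cd.1 cd.2)) else minimo) minimo jpd.2) maximo inner := by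
  simp only [torresGoA]
  rw [if_neg h1, hlook]

-- fuel irrelevance for the A-side recursion (under an acyclic reachable graph)
theorem torresGoA_fuel (portales : List (Int × List (Int × List (Int × Int)))) (energia : List (Int × Int)) (maximo : Int) (r₀ : Int)
    (hacyc : ∀ k ∈ pvReach portales r₀, ∀ c ∈ pvChld portales k, k ∉ pvReach portales c) :
    ∀ (f g : Nat) (i j : Int), i ∈ pvReach portales r₀ →
      pvRank portales i < f → pvRank portales i < g →
      torresGoA f portales energia maximo i j = torresGoA g portales energia maximo i j := by
  intro f
  induction f with
  | zero => intro g i j hR hf hg; omega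
  | succ f ih =>
    intro g i j hR hf hg
    match g, hg with
    | g + 1, hg =>
    by_cases h1 : i = 1
    · simp [torresGoA, h1]
    · cases hlook : portales.lookup i with
      | none => simp [torresGoA, h1, hlook]
      | some inner =>
        rw [torresGoA_step f portales energia maximo i j inner h1 hlook,
            torresGoA_step g portales energia maximo i j inner h1 hlook]
        apply PySem.List.foldl_congr_mem
        intro minimo jpd hjpd
        apply PySem.List.foldl_congr_mem
        intro minimo cd hcd
        have hch : cd.1 ∈ pvChld portales i := pv_mem_chld h1 hlook hjpd hcd
        have hcR : cd.1 ∈ pvReach portales r₀ := pv_reach_closed portales hR hch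
        have hlt : pvRank portales cd.1 < pvRank portales i :=
          pv_rank_lt portales hch (hacyc i hR cd.1 hch)
        rw [ih g cd.1 cd.2 hcR (by omega) (by omega)]

-- fold conversion: A's running-minimum body is a min-fold
theorem pv_foldl_if_eq_min {α : Type} (f : α → Int) (l : List α) (a : Int) :
    l.foldl (fun m x => if f x < m then f x else m) a = l.foldl (fun m x => min m (f x)) a := by
  induction l generalizing a with
  | nil => rfl
  | cons x t ih =>
    simp only [List.foldl_cons]
    rw [ih]
    congr 1
    rw [min_def]
    split_ifs <;> omega

-- every value stored in the memo is the A-side answer for its key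
def pvGood (portales : List (Int × List (Int × List (Int × Int)))) (energia : List (Int × Int)) (maximo : Int)
    (memo : PySem.Dict (Int × Int) Int) : Prop :=
  ∀ q ∈ memo.items, q.2 = torresGoA (portales.length + 1) portales energia maximo q.1.1 q.1.2

-- main invariant: with a consistent memo and enough fuel, B's pass stores A's
-- value at (i, j) and keeps the memo consistent
set_option maxHeartbeats 2000000 in
theorem torresGoB_correct (portales : List (Int × List (Int × List (Int × Int)))) (energia : List (Int × Int)) (maximo : Int) (r₀ : Int)
    (hacyc : ∀ k ∈ pvReach portales r₀, ∀ c ∈ pvChld portales k, k ∉ pvReach portales c) :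
    ∀ (f : Nat) (i j : Int) (memo : PySem.Dict (Int × Int) Int),
      i ∈ pvReach portales r₀ → pvRank portales i < f →
      pvGood portales energia maximo memo →
      pvGood portales energia maximo (torresGoB f portales energia maximo i j memo) ∧
      (torresGoB f portales energia maximo i j memo).get? (i, j) =
        some (torresGoA (portales.length + 1) portales energia maximo i j) := by
  intro f
  induction f with
  | zero => intro i j memo hR hf hgood; omega
  | succ f ih =>
    intro i j memo hR hf hgood
    cases hhit : memo.contains (i, j) with
    | true =>
      have hstep : torresGoB (f + 1) portales energia maximo i j memo = memo := by
        simp only [torresGoB]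
        rw [if_pos hhit]
      rw [hstep]
      have hsome : (memo.get? (i, j)).isSome := by
        rw [← PySem.Dict.contains_eq_isSome_get?]; exact hhit
      obtain ⟨v, hv⟩ : ∃ v, memo.get? (i, j) = some v :=
        ⟨(memo.get? (i, j)).get hsome, Option.eq_some_of_isSome hsome⟩
      refine ⟨hgood, ?_⟩
      rw [hv]
      exact congrArg some (hgood _ (PySem.Dict.mem_items_of_get?_eq_some _ hv))
    | false =>
      by_cases h1 : i = 1
      · have hstep : torresGoB (f + 1) portales energia maximo i j memo =
            memo.insert (i, j) (|j - 1| * ((energia.lookup i).getD 0)) := by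
          simp only [torresGoB]
          rw [if_neg (by simp [hhit]), if_pos h1]
        rw [hstep]
        constructor
        · intro q hq
          rcases (PySem.Dict.mem_items_insert _ _ _ _).1 hq with hq | hq
          · subst hq; simp [torresGoA, h1]
          · exact hgood _ hq.1
        · rw [PySem.Dict.get?_insert_self]
          simp [torresGoA, h1]
      · cases hlook : portales.lookup i with
        | none =>
          have hstep : torresGoB (f + 1) portales energia maximo i j memo =
              memo.insert (i, j) maximo := by
            simp only [torresGoB]
            rw [if_neg (by simp [hhit]), if_neg h1, hlook]
          rw [hstep]
          constructor
          · intro q hq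
            rcases (PySem.Dict.mem_items_insert _ _ _ _).1 hq with hq | hq
            · subst hq; simp [torresGoA, h1, hlook]
            · exact hgood _ hq.1
          · rw [PySem.Dict.get?_insert_self]
            simp [torresGoA, h1, hlook]
        | some inner =>
          -- child facts: destinations stay reachable and drop in rank
          have hchild : ∀ jd ∈ inner, ∀ cd ∈ jd.2,
              cd.1 ∈ pvReach portales r₀ ∧ pvRank portales cd.1 < pvRank portales i := by
            intro jd hjd cd hcd
            have hch : cd.1 ∈ pvChld portales i := pv_mem_chld h1 hlook hjd hcd
            exact ⟨pv_reach_closed portales hR hch,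
              pv_rank_lt portales hch (hacyc i hR cd.1 hch)⟩
          have hstep : torresGoB (f + 1) portales energia maximo i j memo =
              (List.foldl (fun (st : List Int × PySem.Dict (Int × Int) Int) jpd => List.foldl (fun (st : List Int × PySem.Dict (Int × Int) Int) cd => (st.1 ++ [if ((torresGoB f portales energia maximo cd.1 cd.2 st.2).get? (cd.1, cd.2)).getD 0 = maximo then maximo else |j - jpd.1| * ((energia.lookup i).getD 0) + ((torresGoB f portales energia maximo cd.1 cd.2 st.2).get? (cd.1, cd.2)).getD 0], torresGoB f portales energia maximo cd.1 cd.2 st.2)) st jpd.2) ([maximo], memo) inner).2.insert (i, j) ((PySem.List.min? (List.foldl (fun (st : List Int × PySem.Dict (Int × Int) Int) jpd => List.foldl (fun (st : List Int × PySem.Dict (Int × Int) Int) cd => (st.1 ++ [if ((torresGoB f portales energia maximo cd.1 cd.2 st.2).get? (cd.1, cd.2)).getD 0 = maximo then maximo else |j - jpd.1| * ((energia.lookup i).getD 0) + ((torresGoB f portales energia maximo cd.1 cd.2 st.2).get? (cd.1, cd.2)).getD 0], torresGoB f portales energia maximo cd.1 cd.2 st.2)) st jpd.2) ([maximo], memo)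 inner).1 (fun x => x)).getD 0) := by
            simp only [torresGoB]
            rw [if_neg (by simp [hhit]), if_neg h1, hlook]
          -- the fold's state: a consistent memo, and the candidate list A would see
          have key : ∀ (l : List (Int × List (Int × Int))), (∀ jd ∈ l, jd ∈ inner) →
              ∀ (st : List Int × PySem.Dict (Int × Int) Int), pvGood portales energia maximo st.2 →
              pvGood portales energia maximo
                ((List.foldl (fun (st : List Int × PySem.Dict (Int × Int) Int) jpd => List.foldl (fun (st : List Int × PySem.Dict (Int × Int) Int) cd => (st.1 ++ [if ((torresGoB f portales energia maximo cd.1 cd.2 st.2).get? (cd.1, cd.2)).getD 0 = maximo then maximo else |j - jpd.1| * ((energia.lookup i).getD 0) + ((torresGoB f portales energia maximo cd.1 cd.2 st.2).get? (cd.1, cd.2)).getD 0], torresGoB f portales energia maximo cd.1 cd.2 st.2)) st jpd.2) st l).2) ∧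
              (List.foldl (fun (st : List Int × PySem.Dict (Int × Int) Int) jpd => List.foldl (fun (st : List Int × PySem.Dict (Int × Int) Int) cd => (st.1 ++ [if ((torresGoB f portales energia maximo cd.1 cd.2 st.2).get? (cd.1, cd.2)).getD 0 = maximo then maximo else |j - jpd.1| * ((energia.lookup i).getD 0) + ((torresGoB f portales energia maximo cd.1 cd.2 st.2).get? (cd.1, cd.2)).getD 0], torresGoB f portales energia maximo cd.1 cd.2 st.2)) st jpd.2) st l).1
                = st.1 ++ l.flatMap (fun jpd => jpd.2.map (fun cd => if torresGoA (portales.length + 1) portales energia maximo cd.1 cd.2 = maximo then maximo else |j - jpd.1| * ((energia.lookup i).getD 0) + torresGoA (portales.length + 1) portales energia maximo cd.1 cd.2)) := by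
            intro l hl
            induction l with
            | nil => intro st hst; refine ⟨hst, ?_⟩; simp
            | cons jd t iht =>
              intro st hst
              have hjdmem : jd ∈ inner := hl jd List.mem_cons_self
              have hl' : ∀ jd' ∈ t, jd' ∈ inner := fun jd' h => hl jd' (List.mem_cons_of_mem _ h)
              have key2 : ∀ (l2 : List (Int × Int)), (∀ cd ∈ l2, cd ∈ jd.2) →
                  ∀ (st : List Int × PySem.Dict (Int × Int) Int), pvGood portales energia maximo st.2 →
                  pvGood portales energia maximo
                    ((List.foldl (fun (st : List Int × PySem.Dict (Int × Int) Int) cd => (st.1 ++ [if ((torresGoB f portales energia maximo cd.1 cd.2 st.2).get? (cd.1, cd.2)).getD 0 = maximo then maximo else |j - jd.1| * ((energia.lookup i).getD 0) + ((torresGoB f portales energia maximo cd.1 cd.2 st.2).get? (cd.1, cd.2)).getD 0], torresGoB f portales energia maximo cd.1 cd.2 st.2)) st l2).2) ∧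
                  (List.foldl (fun (st : List Int × PySem.Dict (Int × Int) Int) cd => (st.1 ++ [if ((torresGoB f portales energia maximo cd.1 cd.2 st.2).get? (cd.1, cd.2)).getD 0 = maximo then maximo else |j - jd.1| * ((energia.lookup i).getD 0) + ((torresGoB f portales energia maximo cd.1 cd.2 st.2).get? (cd.1, cd.2)).getD 0], torresGoB f portales energia maximo cd.1 cd.2 st.2)) st l2).1
                    = st.1 ++ l2.map (fun cd => if torresGoA (portales.length + 1) portales energia maximo cd.1 cd.2 = maximo then maximo else |j - jd.1| * ((energia.lookup i).getD 0) + torresGoA (portales.length + 1) portales energia maximo cd.1 cd.2) := by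
                intro l2 hl2
                induction l2 with
                | nil => intro st hst; refine ⟨hst, ?_⟩; simp
                | cons cd t2 iht2 =>
                  intro st hst
                  have hcdmem : cd ∈ jd.2 := hl2 cd List.mem_cons_self
                  have ht2 : ∀ cd' ∈ t2, cd' ∈ jd.2 := fun cd' h => hl2 cd' (List.mem_cons_of_mem _ h)
                  obtain ⟨hcR, hclt⟩ := hchild jd hjdmem cd hcdmem
                  have hrec := ih cd.1 cd.2 st.2 hcR (by omega) hst
                  simp only [List.foldl_cons]
                  obtain ⟨h1', h2'⟩ := iht2 ht2
                    (st.1 ++ [if ((torresGoB f portales energia maximo cd.1 cd.2 st.2).get? (cd.1, cd.2)).getD 0 = maximo then maximo else |j - jd.1| * ((energia.lookup i).getD 0) + ((torresGoB f portales energia maximo cd.1 cd.2 st.2).get? (cd.1, cd.2)).getD 0], torresGoB f portales energia maximo cd.1 cd.2 st.2)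
                    hrec.1
                  refine ⟨h1', ?_⟩
                  rw [h2']
                  simp only [hrec.2, Option.getD_some, List.map_cons, List.append_assoc,
                    List.singleton_append]
              simp only [List.foldl_cons]
              obtain ⟨hg2, hv2⟩ := key2 jd.2 (fun cd h => h) st hst
              obtain ⟨hg3, hv3⟩ := iht hl'
                (List.foldl (fun (st : List Int × PySem.Dict (Int × Int) Int) cd => (st.1 ++ [if ((torresGoB f portales energia maximo cd.1 cd.2 st.2).get? (cd.1, cd.2)).getD 0 = maximo then maximo else |j - jd.1| * ((energia.lookup i).getD 0) + ((torresGoB f portales energia maximo cd.1 cd.2 st.2).get? (cd.1, cd.2)).getD 0], torresGoB f portales energia maximo cd.1 cd.2 st.2)) st jd.2)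
                hg2
              refine ⟨hg3, ?_⟩
              rw [hv3, hv2]
              simp [List.append_assoc]
          obtain ⟨hgf, hvf⟩ := key inner (fun _ h => h) ([maximo], memo) hgood
          -- A's value is the min of that candidate list
          have hAA : torresGoA (portales.length + 1) portales energia maximo i j
              = (inner.flatMap (fun jpd => jpd.2.map (fun cd => if torresGoA (portales.length + 1) portales energia maximo cd.1 cd.2 = maximo then maximo else |j - jpd.1| * ((energia.lookup i).getD 0) + torresGoA (portales.length + 1) portales energia maximo cd.1 cd.2))).foldl min maximo := by
            calc torresGoA (portales.length + 1) portales energia maximo i j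
                = List.foldl (fun (minimo : Int) (jpd : Int × List (Int × Int)) => List.foldl (fun (minimo : Int) (cd : Int × Int) => if (if (torresGoA (portales.length + 1) portales energia maximo cd.1 cd.2) = maximo then maximo else |j - jpd.1| * ((energia.lookup i).getD 0) + (torresGoA (portales.length + 1) portales energia maximo cd.1 cd.2)) < minimo then (if (torresGoA (portales.length + 1) portales energia maximo cd.1 cd.2) = maximo then maximo else |j - jpd.1| * ((energia.lookup i).getD 0) + (torresGoA (portales.length + 1) portales energia maximo cd.1 cd.2)) else minimo) minimo jpd.2) maximo inner := by
                  rw [torresGoA_step portales.length portales energia maximo i j inner h1 hlook]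
                  apply PySem.List.foldl_congr_mem
                  intro m jpd hjpd
                  apply PySem.List.foldl_congr_mem
                  intro m cd hcd
                  have hch : cd.1 ∈ pvChld portales i := pv_mem_chld h1 hlook hjpd hcd
                  have hcR : cd.1 ∈ pvReach portales r₀ := pv_reach_closed portales hR hch
                  have hclt : pvRank portales cd.1 < pvRank portales i :=
                    pv_rank_lt portales hch (hacyc i hR cd.1 hch)
                  have hle : pvRank portales i ≤ portales.length := pv_rank_le portales i
                  rw [torresGoA_fuel portales energia maximo r₀ hacyc portales.length (portales.length + 1) cd.1 cd.2 hcR (by omega) (by omega)]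
              _ = List.foldl (fun (m : Int) (jpd : Int × List (Int × Int)) => List.foldl (fun (m : Int) (cd : Int × Int) => min m (if (torresGoA (portales.length + 1) portales energia maximo cd.1 cd.2) = maximo then maximo else |j - jpd.1| * ((energia.lookup i).getD 0) + (torresGoA (portales.length + 1) portales energia maximo cd.1 cd.2))) m jpd.2) maximo inner := by
                  apply PySem.List.foldl_congr_mem
                  intro m jpd _
                  exact pv_foldl_if_eq_min (fun cd => if (torresGoA (portales.length + 1) portales energia maximo cd.1 cd.2) = maximo then maximo else |j - jpd.1| * ((energia.lookup i).getD 0) + (torresGoA (portales.length + 1) portales energia maximo cd.1 cd.2)) jpd.2 m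
              _ = (inner.flatMap (fun jpd => jpd.2.map (fun cd => if torresGoA (portales.length + 1) portales energia maximo cd.1 cd.2 = maximo then maximo else |j - jpd.1| * ((energia.lookup i).getD 0) + torresGoA (portales.length + 1) portales energia maximo cd.1 cd.2))).foldl min maximo := by
                  rw [List.foldl_flatMap]
                  simp only [List.foldl_map]
          have hval : ((PySem.List.min? (List.foldl (fun (st : List Int × PySem.Dict (Int × Int) Int) jpd => List.foldl (fun (st : List Int × PySem.Dict (Int × Int) Int) cd => (st.1 ++ [if ((torresGoB f portales energia maximo cd.1 cd.2 st.2).get? (cd.1, cd.2)).getD 0 = maximo then maximo else |j - jpd.1| * ((energia.lookup i).getD 0) + ((torresGoB f portales energia maximo cd.1 cd.2 st.2).get? (cd.1, cd.2)).getD 0], torresGoB f portales energia maximo cd.1 cd.2 st.2)) st jpd.2) ([maximo], memo) inner).1 (fun x => x)).getD 0)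
              = torresGoA (portales.length + 1) portales energia maximo i j := by
            rw [hvf, List.singleton_append, PySem.List.min?_id_cons, Option.getD_some, hAA]
          rw [hstep]
          constructor
          · intro q hq
            rcases (PySem.Dict.mem_items_insert _ _ _ _).1 hq with hq | hq
            · subst hq; exact hval
            · exact hgf _ hq.1
          · rw [PySem.Dict.get?_insert_self, hval]

-- ===== VERDICT (by name: the statement is the Claim_ definition above) =====
theorem torres_spec : Claim_equal_torres := by
  intro i j portales energia maximo _ hpre
  unfold Spec_torres torres torres_alt
  by_cases h1 : i = 1
  · simp [torresGoA, torresGoB, h1, PySem.Dict.contains_empty, PySem.Dict.get?_insert_self]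
  · cases hlook : portales.lookup i with
    | none => simp [torresGoA, torresGoB, h1, hlook, PySem.Dict.contains_empty, PySem.Dict.get?_insert_self]
    | some inner =>
      have h := torresGoB_correct portales energia maximo i hpre.2.2.1 (portales.length + 1) i j
        PySem.Dict.empty (pv_reach_self portales i)
        (Nat.lt_succ_of_le (pv_rank_le portales i))
        (by intro q hq; simp [PySem.Dict.empty] at hq)
      rw [h.2]
      rfl
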